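-- pv_equiv track=rewrite | github.com/tuhh-softsec/code2DFD | technology_specific_extractors/maven/mvn_entry.py | in_dependency
-- ===== SOURCE A (Python) =====
-- def in_dependency(file: list, line_nr: str) -> bool:
--     """Checks if provided line is inside a <dependency> </dependency> block in the pom.xml .
--     """
--
--     count = line_nr
--     while count >= 0:
--         if "<dependency>" in file[count] and "</dependency>" in file[count]:
--             return False
--         if "<dependency>" in file[count]:
--             return True
--         if "</dependency>" in file[count]:
--             return False
--         count -= 1
--     return False
-- ===== SOURCE B (Python) =====
-- def in_dependency(file: list, line_nr: str) -> bool: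
--     """Checks if provided line is inside a <dependency> </dependency> block in the pom.xml .
--
--     Forward accumulating pass: the last tag-bearing line at or before line_nr
--     decides the answer (open-only -> True, otherwise False).
--     """
--     result = False
--     for count in range(line_nr + 1):
--         line = file[count]
--         has_open = "<dependency>" in line
--         has_close = "</dependency>" in line
--         if has_open or has_close:
--             result = has_open and not has_close
--     return result
-- ===== Notes on version B (the rewrite author's own statement) =====
-- stated objective: alternative
-- what changed: Replaces the backward early-exit while-loop with a single forward pass that folds a boolean over lines 0..line_nr, updating it at every tag-bearing line.
import Mathlib
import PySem

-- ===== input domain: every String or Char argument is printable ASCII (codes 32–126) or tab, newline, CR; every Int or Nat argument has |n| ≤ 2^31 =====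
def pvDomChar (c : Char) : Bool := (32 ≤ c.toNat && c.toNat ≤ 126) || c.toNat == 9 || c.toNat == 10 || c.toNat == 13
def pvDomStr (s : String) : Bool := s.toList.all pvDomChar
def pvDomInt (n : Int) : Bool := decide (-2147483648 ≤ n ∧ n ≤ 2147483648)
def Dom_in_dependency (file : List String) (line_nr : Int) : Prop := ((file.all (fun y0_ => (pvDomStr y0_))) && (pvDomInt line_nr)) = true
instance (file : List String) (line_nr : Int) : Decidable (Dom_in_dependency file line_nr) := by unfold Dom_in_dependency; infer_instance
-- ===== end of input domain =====

-- B replaces A's backward early-exit scan with a forward fold over lines 0..line_nr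
-- that keeps the verdict of the last tag-bearing line; same cost, different decomposition.

-- ===== PORT A =====
-- A's while-loop counting down from line_nr; Pre_ guarantees every index is in range,
-- so the '.getD ""' default is never taken on admitted inputs.
-- the three-branch check of A's loop body: 'some v' = early return v, 'none' = keep looping
def in_dependency_check (line : String) : Option Bool :=
  if PySem.Str.isIn "<dependency>" line && PySem.Str.isIn "</dependency>" line then some false
  else if PySem.Str.isIn "<dependency>" line then some true
  else if PySem.Str.isIn "</dependency>" line then some false
  else none

def in_dependency_go (file : List String) : Nat → Bool
  | 0 => (in_dependency_check ((PySem.List.pyGet? file 0).getD "")).getD false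
  | m + 1 => (in_dependency_check ((PySem.List.pyGet? file ((m : Int) + 1)).getD "")).getD
      (in_dependency_go file m)

def in_dependency (file : List String) (line_nr : Int) : Bool :=
  if line_nr < 0 then false else in_dependency_go file line_nr.toNat

-- ===== PORT B =====
def in_dependency_alt (file : List String) (line_nr : Int) : Bool :=
  (PySem.List.pyRange 0 (line_nr + 1) 1).foldl
    (fun result count =>
      let line := (PySem.List.pyGet? file count).getD ""
      let has_open := PySem.Str.isIn "<dependency>" line
      let has_close := PySem.Str.isIn "</dependency>" line
      if has_open || has_close then has_open && !has_close else result)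
    false

-- ===== PRECONDITION & SPEC =====
-- Pre_ excludes exactly the inputs where Python A raises IndexError: line_nr ≥ len(file).
def Pre_in_dependency (file : List String) (line_nr : Int) : Prop :=
  line_nr < (file.length : Int)
instance (file : List String) (line_nr : Int) : Decidable (Pre_in_dependency file line_nr) := by
  unfold Pre_in_dependency; infer_instance

def pvWitness_in_dependency : List String × Int := (["<project>", "<dependency>", "<artifactId>x</artifactId>"], 2)

def Spec_in_dependency (file : List String) (line_nr : Int) (out : Bool) : Prop := out = in_dependency_alt file line_nr
instance (file : List String) (line_nr : Int) (out : Bool) : Decidable (Spec_in_dependency file line_nr out) := by unfold Spec_in_dependency; infer_instance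

-- ===== CLAIM (what is proved, stated in full; the proofs are below) =====
def Claim_equal_in_dependency : Prop := ∀ (file : List String) (line_nr : Int), Dom_in_dependency file line_nr → Pre_in_dependency file line_nr → Spec_in_dependency file line_nr (in_dependency file line_nr)

-- ===== LEMMAS AND PROOFS =====

-- the fold step of B
def pvStep (file : List String) (result : Bool) (count : Int) : Bool :=
  let line := (PySem.List.pyGet? file count).getD ""
  let has_open := PySem.Str.isIn "<dependency>" line
  let has_close := PySem.Str.isIn "</dependency>" line
  if has_open || has_close then has_open && !has_close else result

lemma pvStep_eq_check (file : List String) (r : Bool) (c : Int) :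
    pvStep file r c = (in_dependency_check ((PySem.List.pyGet? file c).getD "")).getD r := by
  simp only [pvStep, in_dependency_check]
  cases h1 : PySem.Str.isIn "<dependency>" ((PySem.List.pyGet? file c).getD "") <;>
    cases h2 : PySem.Str.isIn "</dependency>" ((PySem.List.pyGet? file c).getD "") <;>
      simp [h1, h2, in_dependency_check]

lemma pvFold_eq_go (file : List String) (n : Nat) :
    (PySem.List.pyRange 0 ((n : Int) + 1) 1).foldl (pvStep file) false = in_dependency_go file n := by
  induction n with
  | zero =>
      rw [show ((0 : Nat) : Int) + 1 = 0 + 1 by norm_num, PySem.List.pyRange_one_singleton]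
      simp only [List.foldl]
      rw [pvStep_eq_check]
      rfl
  | succ m ih =>
      have hsplit : PySem.List.pyRange 0 ((↑(m + 1) : Int) + 1) 1
          = PySem.List.pyRange 0 ((m : Int) + 1) 1 ++ [((m : Int) + 1)] := by
        have := PySem.List.pyRange_one_succ_right (a := 0) (b := (m : Int) + 1) (by positivity)
        simpa using this
      rw [hsplit, List.foldl_append]
      simp only [List.foldl, ih]
      rw [pvStep_eq_check]
      rfl

-- ===== VERDICT (by name: the statement is the Claim_ definition above) =====
theorem in_dependency_spec : Claim_equal_in_dependency := by
  intro file line_nr _ _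
  unfold Spec_in_dependency in_dependency in_dependency_alt
  by_cases hneg : line_nr < 0
  · rw [if_pos hneg, PySem.List.pyRange_one_eq_nil (by omega)]
    rfl
  · rw [if_neg hneg]
    have hcast : line_nr = ((line_nr.toNat : Nat) : Int) := by omega
    rw [hcast]
    exact (pvFold_eq_go file line_nr.toNat).symm
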